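-- pv_equiv track=rewrite | github.com/PAzter1101/patchnotes | app/post_builder.py | _parse_title_and_body
-- ===== SOURCE A (Python) =====
-- def _parse_title_and_body(content: str) -> tuple[str, str]:
--     """Разбирает ответ LLM на заголовок и тело поста."""
--     title = ""
--     body_lines: list[str] = []
--     in_body = False
--
--     for line in content.splitlines():
--         if line.startswith("TITLE:"):
--             title = line.removeprefix("TITLE:").strip()
--         elif line.startswith("BODY:"):
--             in_body = True
--         elif in_body:
--             body_lines.append(line)
--
--     body = "\n".join(body_lines).strip()
--
--     # Fallback если модель не соблюла формат
--     if not title and not body: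
--         return "", content.strip()
--     if not title:
--         return "", body
--     return title, body
-- ===== SOURCE B (Python) =====
-- def _parse_title_and_body(content: str) -> tuple[str, str]:
--     """Same result as A via a different decomposition: last TITLE: line, slice after first BODY: line."""
--     lines = content.splitlines()
--     title_lines = [l for l in lines if l.startswith("TITLE:")]
--     title = title_lines[-1][6:].strip() if title_lines else ""
--     body_idx = next((i for i, l in enumerate(lines) if l.startswith("BODY:")), None)
--     body_lines = [] if body_idx is None else [
--         l for l in lines[body_idx + 1:]
--         if not (l.startswith("TITLE:") or l.startswith("BODY:"))
--     ]
--     body = "\n".join(body_lines).strip()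
--     if not title and not body:
--         return "", content.strip()
--     if not title:
--         return "", body
--     return title, body
-- ===== Notes on version B (the rewrite author's own statement) =====
-- stated objective: alternative
-- what changed: Replaces A's single stateful loop (title/body_lines/in_body accumulator) with three independent declarative passes: title from the last TITLE:-prefixed line, body from a filtered slice after the first BODY:-prefixed line.
import Mathlib
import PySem

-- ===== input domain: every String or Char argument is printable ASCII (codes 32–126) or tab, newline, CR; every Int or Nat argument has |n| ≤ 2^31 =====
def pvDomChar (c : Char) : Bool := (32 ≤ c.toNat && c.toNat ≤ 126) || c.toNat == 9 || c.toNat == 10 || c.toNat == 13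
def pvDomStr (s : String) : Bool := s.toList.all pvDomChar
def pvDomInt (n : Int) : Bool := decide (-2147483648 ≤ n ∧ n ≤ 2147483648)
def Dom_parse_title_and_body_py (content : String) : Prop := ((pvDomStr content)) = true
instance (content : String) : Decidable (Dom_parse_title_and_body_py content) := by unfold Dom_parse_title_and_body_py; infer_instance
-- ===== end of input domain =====

-- B replaces A's single stateful loop with three independent declarative passes (last TITLE: line, slice after first BODY: line); same cost, different decomposition.


-- ===== PORT A =====
-- line.startswith("TITLE:") / ("BODY:")
def pvIsTitle (l : List Char) : Bool := PySem.Chars.startswith l "TITLE:".toList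
def pvIsBody (l : List Char) : Bool := PySem.Chars.startswith l "BODY:".toList

-- one iteration of A's for-loop over state (title, body_lines, in_body);
-- line.removeprefix("TITLE:") is l.drop 6 under the startswith guard (exact there)
def pvStepA (s : List Char × List (List Char) × Bool) (l : List Char) :
    List Char × List (List Char) × Bool :=
  if pvIsTitle l then (PySem.Chars.strip (l.drop 6), s.2.1, s.2.2)
  else if pvIsBody l then (s.1, s.2.1, true)
  else if s.2.2 then (s.1, s.2.1 ++ [l], s.2.2)
  else s

def parse_title_and_body_py (content : String) : String × String :=
  let st := (PySem.Chars.splitlines content.toList).foldl pvStepA ([], [], false)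
  let title := st.1
  let body := PySem.Chars.strip (PySem.Chars.join ['\n'] st.2.1)
  if title.isEmpty && body.isEmpty then ("", String.ofList (PySem.Chars.strip content.toList))
  else if title.isEmpty then ("", String.ofList body)
  else (String.ofList title, String.ofList body)

-- ===== PORT B =====
def parse_title_and_body_py_alt (content : String) : String × String :=
  let lines := PySem.Chars.splitlines content.toList
  let title := match (lines.filter pvIsTitle).getLast? with
    | some l => PySem.Chars.strip (l.drop 6)
    | none => []
  let bodyLines := match lines.findIdx? (fun l => pvIsBody l) with
    | some i => (lines.drop (i + 1)).filter (fun l => !(pvIsTitle l || pvIsBody l))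
    | none => ([] : List (List Char))
  let body := PySem.Chars.strip (PySem.Chars.join ['\n'] bodyLines)
  if title.isEmpty && body.isEmpty then ("", String.ofList (PySem.Chars.strip content.toList))
  else if title.isEmpty then ("", String.ofList body)
  else (String.ofList title, String.ofList body)

-- ===== PRECONDITION & SPEC =====
def Spec_parse_title_and_body_py (content : String) (out : String × String) : Prop := out = parse_title_and_body_py_alt content
instance (content : String) (out : String × String) : Decidable (Spec_parse_title_and_body_py content out) := by unfold Spec_parse_title_and_body_py; infer_instance

-- ===== CLAIM (what is proved, stated in full; the proofs are below) =====
def Claim_equal_parse_title_and_body_py : Prop := ∀ (content : String), Dom_parse_title_and_body_py content → Spec_parse_title_and_body_py content (parse_title_and_body_py content)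

-- ===== LEMMAS AND PROOFS =====

-- the title B computes, as a function of the lines and the running title
def pvTitleOf (lines : List (List Char)) (t0 : List Char) : List Char :=
  match (lines.filter pvIsTitle).getLast? with
  | some l => PySem.Chars.strip (l.drop 6)
  | none => t0

theorem pvTitleOf_cons_title (l : List Char) (lines : List (List Char)) (t0 : List Char)
    (h : pvIsTitle l = true) :
    pvTitleOf (l :: lines) t0 = pvTitleOf lines (PySem.Chars.strip (l.drop 6)) := by
  simp only [pvTitleOf, List.filter_cons, h, if_true, List.getLast?_cons]
  cases (lines.filter pvIsTitle).getLast? <;> simp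

theorem pvTitleOf_cons_other (l : List Char) (lines : List (List Char)) (t0 : List Char)
    (h : pvIsTitle l = false) :
    pvTitleOf (l :: lines) t0 = pvTitleOf lines t0 := by
  simp [pvTitleOf, h]

theorem pvIsBody_of_isTitle (l : List Char) (h : pvIsTitle l = true) : pvIsBody l = false := by
  rw [pvIsTitle, PySem.Chars.startswith_iff] at h
  rcases h with ⟨t, ht⟩
  cases l with
  | nil => simp at ht
  | cons c cs =>
    have hc : c = 'T' := by
      have := congrArg (fun xs => xs.head?) ht
      simpa using this.symm
    subst hc
    rw [pvIsBody]
    rw [Bool.eq_false_iff]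
    intro hb
    rw [PySem.Chars.startswith_iff] at hb
    rcases hb with ⟨u, hu⟩
    have := congrArg (fun xs => xs.head?) hu
    simp at this

-- A's loop once in_body is true: every non-TITLE, non-BODY line is appended
theorem pvFoldA_inbody (lines : List (List Char)) (t0 : List Char) (b0 : List (List Char)) :
    lines.foldl pvStepA (t0, b0, true) =
      (pvTitleOf lines t0,
       b0 ++ lines.filter (fun l => !(pvIsTitle l || pvIsBody l)), true) := by
  induction lines generalizing t0 b0 with
  | nil => simp [pvTitleOf]
  | cons l rest ih =>
    by_cases hT : pvIsTitle l = true
    · simp only [List.foldl_cons, pvStepA, hT, if_true,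
        pvTitleOf_cons_title l rest t0 hT, List.filter_cons,
        pvIsBody_of_isTitle l hT]
      rw [ih]
      simp
    · have hT' : pvIsTitle l = false := by simpa using hT
      by_cases hB : pvIsBody l = true
      · simp only [List.foldl_cons, pvStepA, hT', hB, if_true, if_false, Bool.false_eq_true,
          pvTitleOf_cons_other l rest t0 hT', List.filter_cons]
        rw [ih]
        simp
      · have hB' : pvIsBody l = false := by simpa using hB
        simp only [List.foldl_cons, pvStepA, hT', hB', if_false, if_true, Bool.false_eq_true,
          pvTitleOf_cons_other l rest t0 hT', List.filter_cons]
        rw [ih]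
        simp

-- A's loop before any BODY: line: nothing is appended until the first BODY: line,
-- then pvFoldA_inbody takes over on the remaining lines
theorem pvFoldA_notbody (lines : List (List Char)) (t0 : List Char) (b0 : List (List Char)) :
    lines.foldl pvStepA (t0, b0, false) =
      (pvTitleOf lines t0,
       b0 ++ (match lines.findIdx? (fun l => pvIsBody l) with
              | some i => (lines.drop (i + 1)).filter (fun l => !(pvIsTitle l || pvIsBody l))
              | none => ([] : List (List Char))),
       (lines.findIdx? (fun l => pvIsBody l)).isSome) := by
  induction lines generalizing t0 b0 with
  | nil => simp [pvTitleOf, List.findIdx?_nil]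
  | cons l rest ih =>
    by_cases hB : pvIsBody l = true
    · have hT' : pvIsTitle l = false := by
        rw [Bool.eq_false_iff]; intro hT
        rw [pvIsBody_of_isTitle l hT] at hB; exact Bool.false_ne_true hB
      simp only [List.foldl_cons, pvStepA, hT', hB, if_true, if_false, Bool.false_eq_true]
      rw [pvFoldA_inbody rest t0 b0, pvTitleOf_cons_other l rest t0 hT']
      simp [List.findIdx?_cons, hB]
    · have hB' : pvIsBody l = false := by simpa using hB
      have hfind : (l :: rest).findIdx? (fun l => pvIsBody l) =
          (rest.findIdx? (fun l => pvIsBody l)).map (· + 1) := by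
        simp [List.findIdx?_cons, hB']
      by_cases hT : pvIsTitle l = true
      · simp only [List.foldl_cons, pvStepA, hT, if_true]
        rw [ih, pvTitleOf_cons_title l rest t0 hT, hfind]
        cases rest.findIdx? (fun l => pvIsBody l) <;> simp
      · have hT' : pvIsTitle l = false := by simpa using hT
        simp only [List.foldl_cons, pvStepA, hT', hB', if_false, Bool.false_eq_true]
        rw [ih, pvTitleOf_cons_other l rest t0 hT', hfind]
        cases rest.findIdx? (fun l => pvIsBody l) <;> simp

-- ===== VERDICT (by name: the statement is the Claim_ definition above) =====
theorem parse_title_and_body_py_spec : Claim_equal_parse_title_and_body_py := by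
  intro content _
  unfold Spec_parse_title_and_body_py parse_title_and_body_py parse_title_and_body_py_alt
  rw [pvFoldA_notbody]
  simp only [List.nil_append]
  rfl
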